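-- pv_equiv track=rewrite | github.com/amitb528/intro_cs | hw5/208520528.py | modified_median
-- ===== SOURCE A (Python) =====
-- def modified_median(lst):
--     px = lst[len(lst)//2]
--     l = list()
--     if px < 5:
--         for i in lst:
--             if i >= 5:
--                 l.append(i)
--         return median(l) if len(l) != 0 else px
--     elif px > 250:
--         for i in lst:
--             if i <= 250:
--                 l.append(i)
--         return median(l) if len(l) != 0 else px
--     else:
--         return px
--
-- def median(lst):
--     sort_lst = sorted(lst)
--     l = len(sort_lst)
--     if l%2==1:    # odd number of elements. well defined median
--         return sort_lst[l//2]
--     else:         # even number of elements. average of middle two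
--         return (int(sort_lst[-1+l//2]) + int(sort_lst[l//2])) // 2
-- ===== SOURCE B (Python) =====
-- def modified_median(lst):
--     px = lst[len(lst) // 2]
--     if 5 <= px <= 250:
--         return px
--     # sort the whole list once; the kept elements form a contiguous run of it
--     s = sorted(lst)
--     n = len(s)
--     if px < 5:
--         lo = sum(1 for x in s if x < 5)   # kept run is s[lo:]
--         hi = n
--     else:  # px > 250
--         lo = 0
--         hi = sum(1 for x in s if x <= 250)  # kept run is s[:hi]
--     m = hi - lo
--     if m == 0:
--         return px
--     mid = lo + m // 2
--     if m % 2 == 1: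
--         return s[mid]
--     return (s[mid - 1] + s[mid]) // 2
-- ===== Notes on version B (the rewrite author's own statement) =====
-- stated objective: alternative
-- what changed: Instead of building the filtered list and sorting it inside median(), B sorts the whole list once, counts how many elements fall below/inside the threshold, and reads the median directly from the middle of the contiguous kept run of the single sorted list by index arithmetic.
import Mathlib
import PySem

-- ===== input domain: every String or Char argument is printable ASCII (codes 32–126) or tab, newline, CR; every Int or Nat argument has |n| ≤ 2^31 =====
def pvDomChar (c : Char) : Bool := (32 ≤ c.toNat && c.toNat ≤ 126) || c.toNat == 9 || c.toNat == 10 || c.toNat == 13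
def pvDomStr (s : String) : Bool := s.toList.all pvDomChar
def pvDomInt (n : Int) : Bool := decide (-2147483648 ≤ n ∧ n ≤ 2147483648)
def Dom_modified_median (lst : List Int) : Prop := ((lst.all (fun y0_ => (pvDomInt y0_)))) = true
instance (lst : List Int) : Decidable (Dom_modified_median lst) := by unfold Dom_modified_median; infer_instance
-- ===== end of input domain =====

-- B sorts the whole list once and indexes into it; same return value as A on every nonempty list.

-- ===== PORT A =====
-- helper `median` of A (called only with a nonempty list; pyGetD's default is never used there)
def pvMedian (lst : List Int) : Int :=
  let sort_lst := PySem.List.sorted lst (fun x => x) false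
  let l : Int := PySem.List.len sort_lst
  if PySem.Int.mod l 2 = 1 then
    PySem.List.pyGetD sort_lst (PySem.Int.floordiv l 2) 0
  else
    PySem.Int.floordiv
      (PySem.List.pyGetD sort_lst (-1 + PySem.Int.floordiv l 2) 0 +
       PySem.List.pyGetD sort_lst (PySem.Int.floordiv l 2) 0) 2

def modified_median (lst : List Int) : Int :=
  match PySem.List.pyGet? lst (PySem.Int.floordiv (PySem.List.len lst) 2) with
  | none => 0  -- Python raises IndexError here (empty list); excluded by Pre_
  | some px =>
    if px < 5 then
      let l := lst.foldl (fun acc i => if i ≥ 5 then acc ++ [i] else acc) []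
      if l.length ≠ 0 then pvMedian l else px
    else if px > 250 then
      let l := lst.foldl (fun acc i => if i ≤ 250 then acc ++ [i] else acc) []
      if l.length ≠ 0 then pvMedian l else px
    else px

-- ===== PORT B =====
def modified_median_alt (lst : List Int) : Int :=
  match PySem.List.pyGet? lst (PySem.Int.floordiv (PySem.List.len lst) 2) with
  | none => 0  -- Python raises IndexError here (empty list); excluded by Pre_
  | some px =>
    if 5 ≤ px ∧ px ≤ 250 then px
    else
      let s := PySem.List.sorted lst (fun x => x) false
      let n : Int := PySem.List.len s
      let lohi : Int × Int :=
        if px < 5 then ((s.countP (fun x => decide (x < 5)) : Int), n)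
        else (0, (s.countP (fun x => decide (x ≤ 250)) : Int))
      let m := lohi.2 - lohi.1
      if m = 0 then px
      else
        let mid := lohi.1 + PySem.Int.floordiv m 2
        if PySem.Int.mod m 2 = 1 then PySem.List.pyGetD s mid 0
        else PySem.Int.floordiv
          (PySem.List.pyGetD s (mid - 1) 0 + PySem.List.pyGetD s mid 0) 2

-- ===== PRECONDITION & SPEC =====
-- Pre_ excludes only the empty list, on which A raises IndexError.
def Pre_modified_median (lst : List Int) : Prop := lst ≠ []
instance (lst : List Int) : Decidable (Pre_modified_median lst) := by unfold Pre_modified_median; infer_instance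
def pvWitness_modified_median : List Int := [1, 7, 3]

def Spec_modified_median (lst : List Int) (out : Int) : Prop := out = modified_median_alt lst
instance (lst : List Int) (out : Int) : Decidable (Spec_modified_median lst out) := by unfold Spec_modified_median; infer_instance

-- ===== CLAIM (what is proved, stated in full; the proofs are below) =====
def Claim_equal_modified_median : Prop := ∀ (lst : List Int), Dom_modified_median lst → Pre_modified_median lst → Spec_modified_median lst (modified_median lst)

-- ===== LEMMAS AND PROOFS =====


-- sorting commutes with filtering
lemma sorted_filter (lst : List Int) (p : Int → Bool) :
    PySem.List.sorted (lst.filter p) (fun x => x) false =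
      (PySem.List.sorted lst (fun x => x) false).filter p := by
  apply PySem.List.sorted_id_eq_of_perm_of_pairwise
  · exact ((PySem.List.sorted_perm lst (fun x => x) false).filter p)
  · exact List.Pairwise.filter p (PySem.List.sorted_pairwise lst (fun x => x))

-- in a ≤-sorted list, the elements ≥ 5 are exactly the suffix after the count of elements < 5
lemma filter_ge_eq_drop (s : List Int) (hs : s.Pairwise (· ≤ ·)) :
    s.filter (fun x => decide (5 ≤ x)) = s.drop (s.countP (fun x => decide (x < 5))) := by
  induction s with
  | nil => rfl
  | cons a t ih =>
    rcases List.pairwise_cons.mp hs with ⟨ha, ht⟩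
    by_cases h : a < 5
    · simp [h, not_le.mpr h, ih ht]
    · have hall : ∀ x ∈ t, ¬ x < 5 := fun x hx => by have := ha x hx; omega
      have hc : t.countP (fun x => decide (x < 5)) = 0 :=
        List.countP_eq_zero.mpr (by simpa using hall)
      have hf : t.filter (fun x => decide (5 ≤ x)) = t :=
        List.filter_eq_self.mpr (by intro x hx; simpa using not_lt.mp (hall x hx))
      simp [h, not_lt.mp h, hc, hf]

-- in a ≤-sorted list, the elements ≤ 250 are exactly the prefix of length = their count
lemma filter_le_eq_take (s : List Int) (hs : s.Pairwise (· ≤ ·)) :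
    s.filter (fun x => decide (x ≤ 250)) = s.take (s.countP (fun x => decide (x ≤ 250))) := by
  induction s with
  | nil => rfl
  | cons a t ih =>
    rcases List.pairwise_cons.mp hs with ⟨ha, ht⟩
    by_cases h : a ≤ 250
    · simp [h, ih ht]
    · have hall : ∀ x ∈ t, ¬ x ≤ 250 := fun x hx => by have := ha x hx; omega
      have hc : t.countP (fun x => decide (x ≤ 250)) = 0 :=
        List.countP_eq_zero.mpr (by simpa using hall)
      have hf : t.filter (fun x => decide (x ≤ 250)) = [] :=
        List.filter_eq_nil_iff.mpr (by simpa using hall)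
      simp [h, hc, hf]

-- A's median of a list whose sorted form is the suffix s.drop k equals B's indexing into s
lemma median_drop (s : List Int) (k : Nat) (L : List Int)
    (hL : PySem.List.sorted L (fun x => x) false = s.drop k)
    (hne : L ≠ []) :
    pvMedian L =
      (let m : Int := ((s.length - k : Nat) : Int)
       let mid := (k : Int) + PySem.Int.floordiv m 2
       if PySem.Int.mod m 2 = 1 then PySem.List.pyGetD s mid 0
       else PySem.Int.floordiv
         (PySem.List.pyGetD s (mid - 1) 0 + PySem.List.pyGetD s mid 0) 2) := by
  have hlen : (s.drop k).length = s.length - k := List.length_drop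
  set mN := s.length - k with hm
  have hpos : 0 < mN := by
    have h1 : (PySem.List.sorted L (fun x => x) false).length = L.length :=
      PySem.List.length_sorted L (fun x => x) false
    rw [hL, hlen] at h1
    have : L.length ≠ 0 := by simpa [List.length_eq_zero_iff] using hne
    omega
  have hmod : PySem.Int.mod (mN:Int) 2 = ((mN % 2 : Nat) : Int) := by
    exact_mod_cast PySem.Int.mod_natCast mN 2
  have hdiv : PySem.Int.floordiv (mN:Int) 2 = ((mN / 2 : Nat) : Int) := by
    exact_mod_cast PySem.Int.floordiv_natCast mN 2
  have hget : ∀ j : Nat, PySem.List.pyGetD (s.drop k) (j:Int) 0 = PySem.List.pyGetD s ((k + j : Nat):Int) 0 := by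
    intro j
    simp only [PySem.List.pyGetD_natCast, List.getD_eq_getElem?_getD, List.getElem?_drop]
  simp only [pvMedian, hL, PySem.List.len_eq, hlen, hmod, hdiv]
  have hmid : (k : Int) + ((mN / 2 : Nat) : Int) = ((k + mN / 2 : Nat) : Int) := by push_cast; ring
  by_cases hodd : mN % 2 = 1
  · simp only [hodd, hmid, hget (mN / 2)]
    norm_num
  · have h0 : mN % 2 = 0 := by omega
    have hge1 : 1 ≤ mN / 2 := by omega
    have hA : (-1 + ((mN / 2 : Nat) : Int)) = ((mN / 2 - 1 : Nat) : Int) := by omega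
    have hB : (k : Int) + ((mN / 2 : Nat) : Int) - 1 = ((k + (mN / 2 - 1) : Nat) : Int) := by omega
    simp only [h0, hA, hmid, hget (mN / 2), hget (mN / 2 - 1)]
    norm_num
    have hix : ((k:Int) + ((mN / 2 - 1 : Nat) : Int)) = (k:Int) + (mN:Int) / 2 - 1 := by omega
    rw [hix]

-- A's median of a list whose sorted form is the prefix s.take c equals B's indexing into s
lemma median_take (s : List Int) (c : Nat) (L : List Int)
    (hL : PySem.List.sorted L (fun x => x) false = s.take c)
    (hc : c ≤ s.length)
    (hne : L ≠ []) :
    pvMedian L =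
      (let m : Int := (c : Int)
       let mid := PySem.Int.floordiv m 2
       if PySem.Int.mod m 2 = 1 then PySem.List.pyGetD s mid 0
       else PySem.Int.floordiv
         (PySem.List.pyGetD s (mid - 1) 0 + PySem.List.pyGetD s mid 0) 2) := by
  have hlen : (s.take c).length = c := List.length_take_of_le hc
  have hpos : 0 < c := by
    have h1 : (PySem.List.sorted L (fun x => x) false).length = L.length :=
      PySem.List.length_sorted L (fun x => x) false
    rw [hL, hlen] at h1
    have : L.length ≠ 0 := by simpa [List.length_eq_zero_iff] using hne
    omega
  have hmod : PySem.Int.mod (c:Int) 2 = ((c % 2 : Nat) : Int) := by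
    exact_mod_cast PySem.Int.mod_natCast c 2
  have hdiv : PySem.Int.floordiv (c:Int) 2 = ((c / 2 : Nat) : Int) := by
    exact_mod_cast PySem.Int.floordiv_natCast c 2
  have hget : ∀ j : Nat, j < c → PySem.List.pyGetD (s.take c) (j:Int) 0 = PySem.List.pyGetD s (j:Int) 0 := by
    intro j hj
    simp only [PySem.List.pyGetD_natCast, List.getD_eq_getElem?_getD,
      List.getElem?_take, if_pos hj]
  simp only [pvMedian, hL, PySem.List.len_eq, hlen, hmod, hdiv]
  by_cases hodd : c % 2 = 1
  · simp only [hodd, hget (c / 2) (by omega)]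
    norm_num
  · have h0 : c % 2 = 0 := by omega
    have hge1 : 1 ≤ c / 2 := by omega
    have hA : (-1 + ((c / 2 : Nat) : Int)) = ((c / 2 - 1 : Nat) : Int) := by omega
    have hB : ((c / 2 : Nat) : Int) - 1 = ((c / 2 - 1 : Nat) : Int) := by omega
    simp only [h0, hA, hB, hget (c / 2) (by omega), hget (c / 2 - 1) (by omega)]

-- A's append-loop is a filter
lemma foldl_filter_ge (lst : List Int) :
    lst.foldl (fun acc i => if i ≥ 5 then acc ++ [i] else acc) [] =
      lst.filter (fun i => decide (5 ≤ i)) := by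
  simpa using PySem.List.foldl_append_if (fun i => decide (5 ≤ i)) (fun i => i) lst []

lemma foldl_filter_le (lst : List Int) :
    lst.foldl (fun acc i => if i ≤ 250 then acc ++ [i] else acc) [] =
      lst.filter (fun i => decide (i ≤ 250)) := by
  simpa using PySem.List.foldl_append_if (fun i => decide (i ≤ 250)) (fun i => i) lst []

theorem modified_median_spec : Claim_equal_modified_median := by
  intro lst _ hpre
  unfold Spec_modified_median
  have hlen0 : lst.length ≠ 0 := by simpa [List.length_eq_zero_iff] using hpre
  have hdiv2 : PySem.Int.floordiv (PySem.List.len lst) 2 = ((lst.length / 2 : Nat) : Int) := by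
    simp only [PySem.List.len_eq]
    exact_mod_cast PySem.Int.floordiv_natCast lst.length 2
  have hlt : lst.length / 2 < lst.length := by omega
  have hpx : PySem.List.pyGet? lst (PySem.Int.floordiv (PySem.List.len lst) 2) =
      some (lst[lst.length / 2]'hlt) := by
    rw [hdiv2, PySem.List.pyGet?_natCast]
    exact List.getElem?_eq_getElem hlt
  set px := lst[lst.length / 2]'hlt with hpxdef
  set s := PySem.List.sorted lst (fun x => x) false with hs
  have hsp : s.Pairwise (· ≤ ·) := by simpa using PySem.List.sorted_pairwise lst (fun x => x)
  have hperm : s.Perm lst := PySem.List.sorted_perm lst (fun x => x) false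
  have hslen : s.length = lst.length := hperm.length_eq
  simp only [modified_median, modified_median_alt, hpx]
  by_cases h5 : px < 5
  · rw [if_pos h5, if_neg (show ¬(5 ≤ px ∧ px ≤ 250) by omega)]
    rw [if_pos h5]
    rw [foldl_filter_ge]
    set cN := s.countP (fun x => decide (x < 5)) with hc
    have hcle : cN ≤ s.length := List.countP_le_length
    have hsortL : PySem.List.sorted (lst.filter (fun i => decide (5 ≤ i))) (fun x => x) false = s.drop cN := by
      rw [sorted_filter, ← hs]
      exact filter_ge_eq_drop s hsp
    have hLlen : (lst.filter (fun i => decide (5 ≤ i))).length = s.length - cN := by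
      have h := congrArg List.length hsortL
      simpa [PySem.List.length_sorted] using h
    by_cases hempty : s.length = cN
    · have hA0 : (lst.filter (fun i => decide (5 ≤ i))).length = 0 := by omega
      rw [if_neg (by omega), if_pos (by simp only [PySem.List.len_eq, ← hs]; omega)]
    · have hne : lst.filter (fun i => decide (5 ≤ i)) ≠ [] := by
        intro h
        rw [h] at hLlen
        simp at hLlen
        omega
      rw [if_pos (by omega), if_neg (by simp only [PySem.List.len_eq, ← hs]; omega)]
      rw [median_drop s cN _ hsortL hne]
      have hm : PySem.List.len s - (cN : Int) = ((s.length - cN : Nat) : Int) := by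
        simp only [PySem.List.len_eq]; omega
      rw [hm]
  · by_cases h250 : px > 250
    · rw [if_neg h5, if_pos h250, if_neg (show ¬(5 ≤ px ∧ px ≤ 250) by omega)]
      rw [if_neg h5]
      rw [foldl_filter_le]
      set cN := s.countP (fun x => decide (x ≤ 250)) with hc
      have hcle : cN ≤ s.length := List.countP_le_length
      have hsortL : PySem.List.sorted (lst.filter (fun i => decide (i ≤ 250))) (fun x => x) false = s.take cN := by
        rw [sorted_filter, ← hs]
        exact filter_le_eq_take s hsp
      have hLlen : (lst.filter (fun i => decide (i ≤ 250))).length = cN := by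
        have h := congrArg List.length hsortL
        simpa [PySem.List.length_sorted, Nat.min_eq_left hcle] using h
      by_cases hempty : cN = 0
      · rw [if_neg (by omega), if_pos (by omega)]
      · have hne : lst.filter (fun i => decide (i ≤ 250)) ≠ [] := by
          intro h
          rw [h] at hLlen
          simp at hLlen
          omega
        rw [if_pos (by omega), if_neg (by omega)]
        rw [median_take s cN _ hsortL hcle hne]
        simp only [zero_add, sub_zero]
        rw [← hs]
    · rw [if_neg h5, if_neg h250, if_pos (show (5 ≤ px ∧ px ≤ 250) by omega)]
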